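-- pv_equiv track=rewrite | github.com/JieyuZ2/wrench | wrench/labelmodel/weapo.py | covered_by_
-- ===== SOURCE A (Python) =====
-- def covered_by_(l1, l2):
--     left_cover = False
--     right_cover = False
--     for l1i, l2i in zip(l1, l2):
--         if l1i > l2i:
--             left_cover = True
--         if l2i > l1i:
--             right_cover = True
--         if left_cover and right_cover:
--             return False
--     return right_cover
-- ===== SOURCE B (Python) =====
-- def covered_by_(l1, l2):
--     ge = all(l2i >= l1i for l1i, l2i in zip(l1, l2))
--     gt = any(l2i > l1i for l1i, l2i in zip(l1, l2))
--     return ge and gt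
-- ===== Notes on version B (the rewrite author's own statement) =====
-- stated objective: simpler
-- what changed: Replaces the single flag-carrying loop with early exit by two independent short-circuiting scans stating the dominance relation directly: all(l2i >= l1i) and any(l2i > l1i).
import Mathlib
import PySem

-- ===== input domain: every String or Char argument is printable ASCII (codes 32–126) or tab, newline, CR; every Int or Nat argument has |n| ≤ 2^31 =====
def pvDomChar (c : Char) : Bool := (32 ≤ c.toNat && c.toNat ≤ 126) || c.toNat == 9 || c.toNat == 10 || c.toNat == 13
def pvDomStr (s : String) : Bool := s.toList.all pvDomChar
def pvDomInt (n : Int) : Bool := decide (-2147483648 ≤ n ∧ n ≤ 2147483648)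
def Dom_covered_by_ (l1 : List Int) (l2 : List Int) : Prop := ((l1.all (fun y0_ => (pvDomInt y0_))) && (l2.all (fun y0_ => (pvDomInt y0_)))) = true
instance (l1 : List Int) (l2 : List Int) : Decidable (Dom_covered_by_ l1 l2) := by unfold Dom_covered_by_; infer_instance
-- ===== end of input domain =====

-- B states the dominance relation as two independent scans (all ≥ and any >) instead of A's
-- single flag-carrying loop with early exit; same values everywhere, objective: simpler.

-- ===== PORT A =====
-- loop over zip(l1,l2) carrying the two flags, with A's early `return False`
def coveredLoop : List (Int × Int) → Bool → Bool → Bool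
  | [], _, right_cover => right_cover
  | (l1i, l2i) :: rest, left_cover, right_cover =>
    let left_cover := if l1i > l2i then true else left_cover
    let right_cover := if l2i > l1i then true else right_cover
    if left_cover && right_cover then false
    else coveredLoop rest left_cover right_cover

def covered_by_ (l1 : List Int) (l2 : List Int) : Bool :=
  coveredLoop (l1.zip l2) false false

-- ===== PORT B =====
def covered_by__alt (l1 : List Int) (l2 : List Int) : Bool :=
  let ge := (l1.zip l2).all (fun p => p.2 ≥ p.1)
  let gt := (l1.zip l2).any (fun p => p.2 > p.1)
  ge && gt

-- ===== PRECONDITION & SPEC =====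
def Spec_covered_by_ (l1 : List Int) (l2 : List Int) (out : Bool) : Prop := out = covered_by__alt l1 l2
instance (l1 : List Int) (l2 : List Int) (out : Bool) : Decidable (Spec_covered_by_ l1 l2 out) := by unfold Spec_covered_by_; infer_instance

-- ===== CLAIM (what is proved, stated in full; the proofs are below) =====
def Claim_equal_covered_by_ : Prop := ∀ (l1 : List Int) (l2 : List Int), Dom_covered_by_ l1 l2 → Spec_covered_by_ l1 l2 (covered_by_ l1 l2)

-- ===== LEMMAS AND PROOFS =====

-- invariant: as long as the two flags are not both set, the loop computes
-- (r or ∃ >) and not (l or ∃ <) over the remaining pairs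
theorem coveredLoop_eq (ps : List (Int × Int)) :
    ∀ (l r : Bool), ¬ (l = true ∧ r = true) →
      coveredLoop ps l r =
        ((!(l || ps.any (fun p => p.1 > p.2))) && (r || ps.any (fun p => p.2 > p.1))) := by
  induction ps with
  | nil =>
    intro l r h
    cases l <;> cases r <;> simp_all [coveredLoop]
  | cons p rest ih =>
    intro l r h
    obtain ⟨a, b⟩ := p
    simp only [coveredLoop, List.any_cons]
    by_cases hab : a > b <;> by_cases hba : b > a
    · omega
    · -- left flag becomes true
      cases r with
      | true => simp [hab, hba]
      | false =>
        rw [if_pos hab, if_neg hba, if_neg (by simp), ih true false (by simp)]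
        simp [hab, hba]
    · -- right flag becomes true
      cases l with
      | true => simp [hab, hba]
      | false =>
        rw [if_neg hab, if_pos hba, if_neg (by simp), ih false true (by simp)]
        simp [hab, hba]
    · -- neither comparison fires
      simp only [if_neg hab, if_neg hba]
      rw [if_neg (by cases l <;> cases r <;> simp_all), ih l r h]
      simp [hab, hba]

-- ===== VERDICT (by name: the statement is the Claim_ definition above) =====
theorem covered_by__spec : Claim_equal_covered_by_ := by
  intro l1 l2 _
  unfold Spec_covered_by_ covered_by_ covered_by__alt
  rw [coveredLoop_eq _ false false (by simp)]
  simp only [Bool.false_or]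
  congr 1
  rw [List.all_eq_not_any_not]
  congr 1
  congr 1
  funext p
  rw [← decide_not]
  exact decide_eq_decide.mpr (by constructor <;> intro <;> omega)
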